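-- pv_equiv track=rewrite | github.com/MJRasicci/MotifML | src/motifml/evaluation/sequence_testbed.py | _compute_permutation
-- ===== SOURCE A (Python) =====
-- from collections import deque
--
-- def _compute_permutation(
--     source_pitch_labels: tuple[str, ...],
--     template_pitch_labels: tuple[str, ...],
-- ) -> tuple[int, ...]:
--     positions_by_pitch: dict[str, deque[int]] = {}
--     for index, pitch_label in enumerate(source_pitch_labels):
--         positions_by_pitch.setdefault(pitch_label, deque()).append(index)
--     permutation: list[int] = []
--     for pitch_label in template_pitch_labels:
--         try:
--             permutation.append(positions_by_pitch[pitch_label].popleft())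
--         except (KeyError, IndexError) as exc:
--             raise ValueError(
--                 "Unable to derive one source-template permutation for onset notes."
--             ) from exc
--     return tuple(permutation)
-- ===== SOURCE B (Python) =====
-- def _compute_permutation(
--     source_pitch_labels,
--     template_pitch_labels,
-- ):
--     used = [False] * len(source_pitch_labels)
--     result = []
--     for pitch_label in template_pitch_labels:
--         for i, candidate in enumerate(source_pitch_labels):
--             if not used[i] and candidate == pitch_label:
--                 used[i] = True
--                 result.append(i)
--                 break
--         else:
--             raise ValueError(
--                 "Unable to derive one source-template permutation for onset notes."
--             )
--     return tuple(result)
-- ===== Notes on version B (the rewrite author's own statement) =====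
-- stated objective: alternative
-- what changed: Replaced the pre-built pitch-to-deque position index with a direct scan: for each template label B picks the smallest not-yet-used source index carrying that label via a boolean used-array.
import Mathlib
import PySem

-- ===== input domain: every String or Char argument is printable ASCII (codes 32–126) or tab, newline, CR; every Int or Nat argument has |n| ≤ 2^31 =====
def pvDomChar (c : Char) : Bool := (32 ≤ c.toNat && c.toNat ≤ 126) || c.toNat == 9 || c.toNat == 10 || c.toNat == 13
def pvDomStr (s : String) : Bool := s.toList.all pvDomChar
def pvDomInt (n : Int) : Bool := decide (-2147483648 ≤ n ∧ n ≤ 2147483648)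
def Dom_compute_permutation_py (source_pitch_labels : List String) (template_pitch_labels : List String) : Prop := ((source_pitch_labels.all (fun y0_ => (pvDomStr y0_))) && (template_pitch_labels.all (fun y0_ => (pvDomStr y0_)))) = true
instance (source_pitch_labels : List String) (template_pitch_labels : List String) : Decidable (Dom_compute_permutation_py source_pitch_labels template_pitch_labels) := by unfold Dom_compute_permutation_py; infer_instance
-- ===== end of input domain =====

-- B replaces A's pitch->deque position index with a direct smallest-unused-index scan over a
-- boolean used-array (alternative decomposition; not faster). A raises ValueError when some
-- template pitch occurs more often than in the source; Pre_ excludes exactly those inputs.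


-- ===== PORT A =====
-- for index, pitch_label in enumerate(...): positions_by_pitch.setdefault(l, deque()).append(index)
def pvA_build : List String → Nat → PySem.Dict String (List Int) → PySem.Dict String (List Int)
  | [], _, d => d
  | s :: ss, i, d => pvA_build ss (i + 1) (d.insert s (d.getD s [] ++ [(i : Int)]))

-- for pitch_label in template: permutation.append(positions_by_pitch[l].popleft());
-- on KeyError/IndexError the Python raises ValueError (excluded by Pre_): modelled by returning the
-- permutation built so far.
def pvA_loop (d : PySem.Dict String (List Int)) : List String → List Int → List Int
  | [], acc => acc
  | l :: rest, acc =>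
    match d.getD l [] with
    | [] => acc
    | p :: ps => pvA_loop (d.insert l ps) rest (acc ++ [p])

def compute_permutation_py (source_pitch_labels : List String) (template_pitch_labels : List String) : List Int :=
  pvA_loop (pvA_build source_pitch_labels 0 PySem.Dict.empty) template_pitch_labels []

-- ===== PORT B =====
-- inner for-loop: smallest i with not used[i] and source[i] == pitch_label
def pvB_find : List String → List Bool → String → Nat → Option Nat
  | s :: ss, u :: us, l, i => if s = l ∧ u = false then some i else pvB_find ss us l (i + 1)
  | _, _, _, _ => none

-- outer for-loop over template labels; the for-else ValueError (excluded by Pre_) is modelled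
-- by returning the result built so far.
def pvB_loop (src : List String) (used : List Bool) : List String → List Int → List Int
  | [], acc => acc
  | l :: rest, acc =>
    match pvB_find src used l 0 with
    | some i => pvB_loop src (used.set i true) rest (acc ++ [(i : Int)])
    | none => acc

def compute_permutation_py_alt (source_pitch_labels : List String) (template_pitch_labels : List String) : List Int :=
  pvB_loop source_pitch_labels (List.replicate source_pitch_labels.length false) template_pitch_labels []

-- ===== PRECONDITION & SPEC =====
-- Pre_ excludes exactly the inputs on which Python A raises ValueError: some template pitch label
-- occurs more often in the template than in the source.
def Pre_compute_permutation_py (source_pitch_labels : List String) (template_pitch_labels : List String) : Prop :=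
  ∀ l ∈ template_pitch_labels, template_pitch_labels.count l ≤ source_pitch_labels.count l
instance (source_pitch_labels : List String) (template_pitch_labels : List String) : Decidable (Pre_compute_permutation_py source_pitch_labels template_pitch_labels) := by unfold Pre_compute_permutation_py; infer_instance
def pvWitness_compute_permutation_py : List String × List String := (["C", "E", "C", "G"], ["G", "C", "C"])
def Spec_compute_permutation_py (source_pitch_labels : List String) (template_pitch_labels : List String) (out : List Int) : Prop := out = compute_permutation_py_alt source_pitch_labels template_pitch_labels
instance (source_pitch_labels : List String) (template_pitch_labels : List String) (out : List Int) : Decidable (Spec_compute_permutation_py source_pitch_labels template_pitch_labels out) := by unfold Spec_compute_permutation_py; infer_instance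

-- ===== CLAIM (what is proved, stated in full; the proofs are below) =====
def Claim_equal_compute_permutation_py : Prop := ∀ (source_pitch_labels : List String) (template_pitch_labels : List String), Dom_compute_permutation_py source_pitch_labels template_pitch_labels → Pre_compute_permutation_py source_pitch_labels template_pitch_labels → Spec_compute_permutation_py source_pitch_labels template_pitch_labels (compute_permutation_py source_pitch_labels template_pitch_labels)

-- ===== LEMMAS AND PROOFS =====

-- the ascending list of indices (from offset k) of unused source positions carrying label l
def pvAvail : List String → List Bool → String → Nat → List Nat
  | s :: ss, u :: us, l, k => if s = l ∧ u = false then k :: pvAvail ss us l (k + 1) else pvAvail ss us l (k + 1)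
  | _, _, _, _ => []

theorem pvAvail_ge {ss : List String} {us : List Bool} {l : String} {k a : Nat}
    (h : a ∈ pvAvail ss us l k) : k ≤ a := by
  induction ss generalizing us k with
  | nil => simp [pvAvail] at h
  | cons s ss ih =>
    cases us with
    | nil => simp [pvAvail] at h
    | cons u us =>
      simp only [pvAvail] at h
      split at h
      · rcases List.mem_cons.mp h with rfl | h
        · exact le_refl _
        · exact Nat.le_of_succ_le (ih h)
      · exact Nat.le_of_succ_le (ih h)

theorem pvB_find_eq_head {ss : List String} {us : List Bool} {l : String} {k : Nat} :
    pvB_find ss us l k = (pvAvail ss us l k).head? := by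
  induction ss generalizing us k with
  | nil => cases us <;> simp [pvB_find, pvAvail]
  | cons s ss ih =>
    cases us with
    | nil => simp [pvB_find, pvAvail]
    | cons u us =>
      simp only [pvB_find, pvAvail]
      split <;> simp [ih]

theorem pvAvail_set_self {ss : List String} {us : List Bool} {l : String} {k j : Nat} {rest : List Nat}
    (h : pvAvail ss us l k = (k + j) :: rest) :
    pvAvail ss (us.set j true) l k = rest := by
  induction ss generalizing us k j with
  | nil => simp [pvAvail] at h
  | cons s ss ih =>
    cases us with
    | nil => simp [pvAvail] at h
    | cons u us =>
      simp only [pvAvail] at h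
      split at h
      · rename_i hc
        rw [List.cons.injEq] at h
        have hj : j = 0 := by omega
        subst hj
        simp only [List.set]
        simp [pvAvail, h.2]
      · rename_i hc
        have hge : k + 1 ≤ k + j := by
          have : k + j ∈ pvAvail ss us l (k + 1) := by rw [h]; exact List.mem_cons_self ..
          have := pvAvail_ge this; omega
        have hj : j = (j - 1) + 1 := by omega
        rw [hj]
        simp only [List.set]
        simp only [pvAvail]
        rw [if_neg hc]
        exact ih (j := j - 1) (by rw [h]; congr 1; omega)

theorem pvAvail_set_other {ss : List String} {us : List Bool} {l l' : String} {k j : Nat} {rest : List Nat}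
    (hne : l' ≠ l) (h : pvAvail ss us l k = (k + j) :: rest) :
    pvAvail ss (us.set j true) l' k = pvAvail ss us l' k := by
  induction ss generalizing us k j with
  | nil => simp [pvAvail] at h
  | cons s ss ih =>
    cases us with
    | nil => simp [pvAvail] at h
    | cons u us =>
      simp only [pvAvail] at h
      split at h
      · rename_i hc
        rw [List.cons.injEq] at h
        have hj : j = 0 := by omega
        subst hj
        simp only [List.set]
        have hs : ¬(s = l' ∧ true = false) := by simp
        have hs' : ¬(s = l' ∧ u = false) := by
          rintro ⟨h1, _⟩; exact hne (h1.symm.trans hc.1)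
        simp only [pvAvail, if_neg hs, if_neg hs']
      · rename_i hc
        have hge : k + 1 ≤ k + j := by
          have : k + j ∈ pvAvail ss us l (k + 1) := by rw [h]; exact List.mem_cons_self ..
          have := pvAvail_ge this; omega
        have hj : j = (j - 1) + 1 := by omega
        rw [hj]
        simp only [List.set]
        simp only [pvAvail]
        have := ih (j := j - 1) (by rw [h]; congr 1; omega)
        split <;> rw [this]

theorem pvA_build_getD (ss : List String) (i : Nat) (d : PySem.Dict String (List Int)) (l : String) :
    (pvA_build ss i d).getD l [] = d.getD l [] ++ (pvAvail ss (List.replicate ss.length false) l i).map (fun n => Int.ofNat n) := by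
  induction ss generalizing i d with
  | nil => simp [pvA_build, pvAvail]
  | cons s ss ih =>
    simp only [pvA_build, List.length_cons, List.replicate_succ, pvAvail]
    rw [ih, PySem.Dict.getD_insert]
    by_cases hls : l = s
    · subst hls
      rw [if_pos rfl, if_pos (by simp), List.map_cons, List.append_assoc]
      rfl
    · rw [if_neg hls, if_neg (by rintro ⟨h1, -⟩; exact hls h1.symm)]

theorem pvLoop_eq (tmpl : List String) (src : List String) (used : List Bool)
    (d : PySem.Dict String (List Int)) (acc : List Int)
    (hinv : ∀ l, d.getD l [] = (pvAvail src used l 0).map (fun n => Int.ofNat n)) :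
    pvA_loop d tmpl acc = pvB_loop src used tmpl acc := by
  induction tmpl generalizing used d acc with
  | nil => rfl
  | cons l rest ih =>
    simp only [pvA_loop, pvB_loop, hinv l, pvB_find_eq_head]
    cases hav : pvAvail src used l 0 with
    | nil => rfl
    | cons i ps =>
      simp only [List.map_cons, List.head?_cons]
      refine ih _ _ _ ?_
      intro l'
      rw [PySem.Dict.getD_insert]
      by_cases hll : l' = l
      · subst hll
        rw [if_pos rfl, pvAvail_set_self (j := i) (by simpa using hav)]
      · rw [if_neg hll, hinv l', pvAvail_set_other hll (j := i) (by simpa using hav)]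

-- ===== VERDICT (by name: the statement is the Claim_ definition above) =====
theorem compute_permutation_py_spec : Claim_equal_compute_permutation_py := by
  intro src tmpl _ _
  unfold Spec_compute_permutation_py compute_permutation_py compute_permutation_py_alt
  refine pvLoop_eq tmpl src _ _ [] ?_
  intro l
  rw [pvA_build_getD]
  simp [PySem.Dict.getD_empty]
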